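-- pv_equiv track=rewrite | github.com/robeekhout/adventofcode | days/adventday10.py | chain_the_adapters
-- ===== SOURCE A (Python) =====
-- def chain_the_adapters(adapterlist):
--     one_diff = 0
--     three_diff = 1  # device's built-in adapter is always three
--     adapterlist.insert(0, 0)  # add the charging outlet to the list
--     for ix in range(len(adapterlist) - 1):
--         if adapterlist[ix + 1] - adapterlist[ix] == 1:
--             one_diff += 1
--         elif adapterlist[ix + 1] - adapterlist[ix] == 3:
--             three_diff += 1
--     return one_diff * three_diff
-- ===== SOURCE B (Python) =====
-- def chain_the_adapters(adapterlist):
--     adapterlist.insert(0, 0)  # add the charging outlet (same in-place mutation as A)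
--     one, three = _tally(adapterlist)
--     return one * (three + 1)  # +1 is the device's built-in three-gap adapter
--
--
-- def _tally(lst):
--     # divide and conquer: gap tallies (ones, threes) within lst are the tallies of
--     # each half plus the one crossing gap at the split point
--     n = len(lst)
--     if n < 2:
--         return (0, 0)
--     mid = n // 2
--     o1, t1 = _tally(lst[:mid])
--     o2, t2 = _tally(lst[mid:])
--     d = lst[mid] - lst[mid - 1]
--     return (o1 + o2 + (d == 1), t1 + t2 + (d == 3))
-- ===== Notes on version B (the rewrite author's own statement) =====
-- stated objective: alternative
-- what changed: Replaces A's single indexed for-loop with two if/elif counters by a divide-and-conquer recursion: split the list at the midpoint, tally the 1- and 3-gaps of each half, and add the one crossing gap; the product folds in the device's built-in three-gap as +1.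
import Mathlib
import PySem

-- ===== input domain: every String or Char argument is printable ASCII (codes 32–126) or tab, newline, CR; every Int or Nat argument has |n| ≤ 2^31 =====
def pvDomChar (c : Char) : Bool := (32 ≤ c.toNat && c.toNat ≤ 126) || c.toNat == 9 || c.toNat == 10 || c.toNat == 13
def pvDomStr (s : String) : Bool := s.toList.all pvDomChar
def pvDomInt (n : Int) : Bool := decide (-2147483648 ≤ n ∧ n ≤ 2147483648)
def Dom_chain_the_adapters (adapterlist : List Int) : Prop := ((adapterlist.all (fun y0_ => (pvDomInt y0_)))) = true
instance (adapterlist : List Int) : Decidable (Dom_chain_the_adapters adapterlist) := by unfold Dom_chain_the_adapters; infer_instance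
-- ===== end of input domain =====

-- B replaces A's indexed loop (two if/elif counters) by a divide-and-conquer recursion
-- tallying 1- and 3-gaps of each half plus the crossing gap; both A and B mutate
-- adapterlist via insert(0, 0), the equivalence proved is about the return value.
-- Objective: alternative (different algorithm, same result).


-- ===== PORT A =====
-- literal port of A: adapterlist.insert(0, 0); indexed loop over range(len-1) with two
-- counters (one_diff, three_diff); indices ix, ix+1 are always in range, so pyGetD's
-- default 0 is never consulted
def chain_the_adapters (adapterlist : List Int) : Int :=
  let lst : List Int := (0 : Int) :: adapterlist
  let st := (PySem.List.pyRange 0 ((lst.length : Int) - 1) 1).foldl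
    (fun (st : Int × Int) ix =>
      if PySem.List.pyGetD lst (ix + 1) 0 - PySem.List.pyGetD lst ix 0 == 1 then (st.1 + 1, st.2)
      else if PySem.List.pyGetD lst (ix + 1) 0 - PySem.List.pyGetD lst ix 0 == 3 then (st.1, st.2 + 1)
      else st) ((0 : Int), (1 : Int))
  st.1 * st.2

-- ===== PORT B =====
-- literal port of Source B's _tally: divide and conquer on the list; lst[:mid]/lst[mid:] are
-- List.take/List.drop (exact for this in-range nonnegative mid), lst[mid], lst[mid-1] via pyGetD
def pvTallyB (l : List Int) : Int × Int :=
  let n := l.length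
  if n < 2 then ((0 : Int), (0 : Int))
  else
    let mid := n / 2
    let p1 := pvTallyB (l.take mid)
    let p2 := pvTallyB (l.drop mid)
    let d := PySem.List.pyGetD l (mid : Int) 0 - PySem.List.pyGetD l ((mid : Int) - 1) 0
    (p1.1 + p2.1 + (if d = 1 then 1 else 0), p1.2 + p2.2 + (if d = 3 then 1 else 0))
termination_by l.length
decreasing_by
  · simp only [List.length_take]; omega
  · simp only [List.length_drop]; omega

def chain_the_adapters_alt (adapterlist : List Int) : Int :=
  let lst : List Int := (0 : Int) :: adapterlist
  let p := pvTallyB lst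
  p.1 * (p.2 + 1)

-- ===== PRECONDITION & SPEC =====
def Spec_chain_the_adapters (adapterlist : List Int) (out : Int) : Prop := out = chain_the_adapters_alt adapterlist
instance (adapterlist : List Int) (out : Int) : Decidable (Spec_chain_the_adapters adapterlist out) := by unfold Spec_chain_the_adapters; infer_instance

-- ===== CLAIM (what is proved, stated in full; the proofs are below) =====
def Claim_equal_chain_the_adapters : Prop := ∀ (adapterlist : List Int), Dom_chain_the_adapters adapterlist → Spec_chain_the_adapters adapterlist (chain_the_adapters adapterlist)

-- ===== LEMMAS AND PROOFS =====

-- list of consecutive differences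
def pvDiffs : List Int → List Int
  | a :: b :: t => (b - a) :: pvDiffs (b :: t)
  | _ => []

theorem pvDiffs_eq_zip (l : List Int) :
    pvDiffs l = (l.zip (l.drop 1)).map (fun p => p.2 - p.1) := by
  match l with
  | [] => rfl
  | [_] => rfl
  | a :: b :: t =>
    simp only [pvDiffs, List.drop_one, List.tail_cons, List.zip_cons_cons, List.map_cons]
    have := pvDiffs_eq_zip (b :: t)
    simp only [List.drop_one, List.tail_cons] at this
    rw [this]

theorem pvDiffs_append (u v : List Int) (hu : u ≠ []) (hv : v ≠ []) :
    pvDiffs (u ++ v) = pvDiffs u ++ (v.headD 0 - u.getLastD 0) :: pvDiffs v := by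
  match u with
  | [] => exact absurd rfl hu
  | [a] =>
    match v with
    | [] => exact absurd rfl hv
    | b :: t => simp [pvDiffs]
  | a :: a2 :: t =>
    have ih := pvDiffs_append (a2 :: t) v (by simp) hv
    simp only [List.cons_append, pvDiffs] at *
    rw [ih]
    simp

-- indexed adjacent pairs of a list are its zip with its tail
theorem range_pairs_eq_zip (l : List Int) :
    (List.range (l.length - 1)).map (fun k => (l.getD k 0, l.getD (k + 1) 0)) = l.zip (l.drop 1) := by
  induction l with
  | nil => simp
  | cons a t ih =>
    cases t with
    | nil => simp
    | cons b t' =>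
      simp only [List.length_cons, Nat.add_sub_cancel, List.range_succ_eq_map,
        List.map_cons, List.map_map, List.drop_one, List.tail_cons, List.zip_cons_cons]
      refine congrArg (_ :: ·) ?_
      have := ih
      simp only [List.length_cons, Nat.add_sub_cancel, List.drop_one, List.tail_cons] at this
      rw [← this]
      simp [Function.comp]

-- the two-counter fold over the diff list computes the two counts
theorem fold_counts (ds : List Int) : ∀ (o t : Int),
    ds.foldl (fun (st : Int × Int) d =>
      if d == 1 then (st.1 + 1, st.2) else if d == 3 then (st.1, st.2 + 1) else st) (o, t)
    = (o + (ds.count 1 : Int), t + (ds.count 3 : Int)) := by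
  induction ds with
  | nil => simp
  | cons d ds ih =>
    intro o t
    rw [List.foldl_cons]
    by_cases h1 : d = 1
    · rw [if_pos (by simp [h1])]
      rw [ih]
      subst h1
      simp
      ring
    · rw [if_neg (by simp [h1])]
      by_cases h3 : d = 3
      · rw [if_pos (by simp [h3])]
        rw [ih]
        subst h3
        simp
        ring
      · rw [if_neg (by simp [h3])]
        rw [ih]
        simp [h1, h3]

theorem headD_drop (l : List Int) (m : Nat) (hm : m < l.length) :
    (l.drop m).headD 0 = l.getD m 0 := by
  simp [List.headD_eq_head?_getD, List.head?_eq_getElem?, List.getElem?_drop, List.getD]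

theorem getLastD_take (l : List Int) (m : Nat) (h1 : 1 ≤ m) (h2 : m ≤ l.length) :
    (l.take m).getLastD 0 = l.getD (m - 1) 0 := by
  simp [List.getLastD_eq_getLast?, List.getLast?_eq_getElem?, List.length_take,
    Nat.min_eq_left h2, List.getD, Nat.sub_lt_of_pos_le (by omega) h1,
    List.getElem?_eq_getElem (show m - 1 < l.length by omega)]

-- the divide-and-conquer tally computes the counts of 1s and 3s among the diffs
theorem pvTallyB_eq (l : List Int) :
    pvTallyB l = (((pvDiffs l).count 1 : Int), ((pvDiffs l).count 3 : Int)) := by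
  rw [pvTallyB]
  by_cases h : l.length < 2
  · rw [if_pos h]
    match l, h with
    | [], _ => rfl
    | [_], _ => rfl
  · rw [if_neg h]
    have hn : 2 ≤ l.length := by omega
    set m := l.length / 2
    have hm1 : 1 ≤ m := by omega
    have hmlt : m < l.length := by omega
    have ih1 := pvTallyB_eq (l.take m)
    have ih2 := pvTallyB_eq (l.drop m)
    have hsplit : pvDiffs l
        = pvDiffs (l.take m) ++ ((l.drop m).headD 0 - (l.take m).getLastD 0) :: pvDiffs (l.drop m) := by
      have ht : l.take m ≠ [] := by
        intro hc; have := congrArg List.length hc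
        simp only [List.length_take, List.length_nil] at this; omega
      have hdr : l.drop m ≠ [] := by
        intro hc; have := congrArg List.length hc
        simp only [List.length_drop, List.length_nil] at this; omega
      conv_lhs => rw [← List.take_append_drop m l]
      exact pvDiffs_append _ _ ht hdr
    simp only [ih1, ih2]
    rw [hsplit]
    have hget1 : PySem.List.pyGetD l (m : Int) 0 = l.getD m 0 := by
      rw [PySem.List.pyGetD_natCast]
    have hget2 : PySem.List.pyGetD l ((m : Int) - 1) 0 = l.getD (m - 1) 0 := by
      have : ((m : Int) - 1) = ((m - 1 : Nat) : Int) := by omega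
      rw [this, PySem.List.pyGetD_natCast]
    have hd : PySem.List.pyGetD l (m : Int) 0 - PySem.List.pyGetD l ((m : Int) - 1) 0
        = (l.drop m).headD 0 - (l.take m).getLastD 0 := by
      rw [hget1, hget2, headD_drop l m hmlt, getLastD_take l m hm1 (by omega)]
    rw [hd]
    simp only [List.count_append, List.count_cons, beq_iff_eq, Prod.mk.injEq]
    refine ⟨?_, ?_⟩ <;>
    · split_ifs <;> push_cast <;> ring
termination_by l.length
decreasing_by
  · simp only [List.length_take]; omega
  · simp only [List.length_drop]; omega

-- ===== VERDICT (by name: the statement is the Claim_ definition above) =====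
theorem chain_the_adapters_spec : Claim_equal_chain_the_adapters := by
  intro adapterlist _
  unfold Spec_chain_the_adapters chain_the_adapters chain_the_adapters_alt
  dsimp only
  set l : List Int := (0 : Int) :: adapterlist with hl
  rw [PySem.List.pyRange_one]
  rw [show ((l.length : Int) - 1 - 0).toNat = l.length - 1 by omega]
  rw [List.foldl_map]
  simp only [zero_add]
  have hf : (fun (x : Int × Int) (y : Nat) =>
      if PySem.List.pyGetD l ((y : Int) + 1) 0 - PySem.List.pyGetD l (y : Int) 0 == 1 then (x.1 + 1, x.2)
      else if PySem.List.pyGetD l ((y : Int) + 1) 0 - PySem.List.pyGetD l (y : Int) 0 == 3 then (x.1, x.2 + 1)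
      else x)
      = (fun (x : Int × Int) (y : Nat) =>
        (fun (st : Int × Int) (p : Int × Int) =>
          if p.2 - p.1 == 1 then (st.1 + 1, st.2)
          else if p.2 - p.1 == 3 then (st.1, st.2 + 1) else st) x (l.getD y 0, l.getD (y + 1) 0)) := by
    funext x y
    have e2 : ((y : Int) + 1) = (((y + 1 : Nat)) : Int) := by push_cast; ring
    rw [e2, PySem.List.pyGetD_natCast, PySem.List.pyGetD_natCast]
  rw [hf]
  rw [← List.foldl_map (f := fun k => (l.getD k 0, l.getD (k + 1) 0))
      (g := fun (st : Int × Int) (p : Int × Int) =>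
        if p.2 - p.1 == 1 then (st.1 + 1, st.2)
        else if p.2 - p.1 == 3 then (st.1, st.2 + 1) else st)]
  rw [range_pairs_eq_zip]
  rw [← List.foldl_map (f := fun (p : Int × Int) => p.2 - p.1)
      (g := fun (st : Int × Int) d =>
        if d == 1 then (st.1 + 1, st.2) else if d == 3 then (st.1, st.2 + 1) else st)]
  rw [fold_counts]
  rw [pvTallyB_eq, pvDiffs_eq_zip]
  push_cast
  ring
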